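-- pv_equiv track=rewrite | github.com/whsqkaak/CodingTrainingStudy | binarysearch/bridge.py | solution
-- ===== SOURCE A (Python) =====
-- def solution(distance, rocks, n):
--     answer = 0
--     rocks.sort()
--     all_rocks = rocks.copy()
--     all_rocks.append(0)
--     all_rocks.append(distance)
--     tmp_dist = []
--
--     for t in rocks:
--         tmp = list(map(lambda x:abs(x - t), all_rocks))
--         tmp.remove(0)
--         tmp_dist.append(min(tmp))
--     return max(tmp_dist)
-- ===== SOURCE B (Python) =====
-- def solution(distance, rocks, n):
--     rocks.sort()
--     pts = sorted(rocks + [0, distance])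
--     m = len(pts)
--     ans = 0
--     j = 0
--     for t in rocks:
--         while pts[j] < t:
--             j += 1
--         if j > 0 and j + 1 < m:
--             near = min(t - pts[j - 1], pts[j + 1] - t)
--         elif j > 0:
--             near = t - pts[j - 1]
--         else:
--             near = pts[j + 1] - t
--         if near > ans:
--             ans = near
--     return ans
-- ===== Notes on version B (the rewrite author's own statement) =====
-- stated objective: faster
-- what changed: B replaces A's per-rock scan over all points (building and minimizing a full distance list for every rock) by one sort of rocks+endpoints and a single pointer walk that reads each rock's nearest neighbor off its adjacent sorted gaps.
import Mathlib
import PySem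

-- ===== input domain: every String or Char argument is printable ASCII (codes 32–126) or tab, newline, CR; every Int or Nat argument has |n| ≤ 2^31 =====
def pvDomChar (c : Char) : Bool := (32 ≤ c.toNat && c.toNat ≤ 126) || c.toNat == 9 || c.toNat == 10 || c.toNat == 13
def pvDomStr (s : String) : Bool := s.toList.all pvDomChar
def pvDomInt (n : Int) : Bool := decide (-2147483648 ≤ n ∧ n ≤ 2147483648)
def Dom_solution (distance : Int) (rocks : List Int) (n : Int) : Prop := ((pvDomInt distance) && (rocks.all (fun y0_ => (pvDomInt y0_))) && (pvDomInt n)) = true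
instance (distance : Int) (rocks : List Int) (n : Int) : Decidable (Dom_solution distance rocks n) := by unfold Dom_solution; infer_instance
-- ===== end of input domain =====

-- B replaces A's quadratic all-pairs nearest-neighbor scan by one sort and a single
-- pointer walk over adjacent gaps (O(n log n) vs O(n^2)); A sorts `rocks` in place and
-- B performs the same mutation; the equivalence proved here is about the return value.

-- ===== PORT A =====
def solution (distance : Int) (rocks : List Int) (n : Int) : Int :=
  let rocks2 := PySem.List.sorted rocks (fun x => x) false
  let all_rocks := rocks2 ++ [0, distance]
  let tmp_dist := rocks2.map (fun t =>
    match PySem.List.remove? (all_rocks.map (fun x => |x - t|)) 0 with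
    | some tmp2 => (PySem.List.min? tmp2 (fun y => y)).getD 0   -- getD unreachable: tmp2 nonempty inside Pre_
    | none => 0)                                                -- none = ValueError, unreachable: 0 ∈ tmp
  (PySem.List.max? tmp_dist (fun y => y)).getD 0                -- getD 0 = max([]) ValueError, excluded by Pre_

-- ===== PORT B =====
-- `while pts[j] < t: j += 1`
def bAdvance (pts : List Int) (t : Int) (j : Nat) : Nat :=
  if h : j < pts.length then
    if pts[j] < t then bAdvance pts t (j + 1) else j
  else j
termination_by pts.length - j

-- the if/elif/else computing `near` (indices are guarded in range in Source B; getD 0 is dead)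
def bNear (pts : List Int) (m : Nat) (t : Int) (j : Nat) : Int :=
  if 0 < j ∧ j + 1 < m then min (t - pts.getD (j - 1) 0) (pts.getD (j + 1) 0 - t)
  else if 0 < j then t - pts.getD (j - 1) 0
  else pts.getD (j + 1) 0 - t

-- one iteration of the `for t in rocks` loop, state = (ans, j)
def bStep (pts : List Int) (m : Nat) (st : Int × Nat) (t : Int) : Int × Nat :=
  let j := bAdvance pts t st.2
  let near := bNear pts m t j
  (if near > st.1 then near else st.1, j)

def solution_alt (distance : Int) (rocks : List Int) (n : Int) : Int :=
  let rocks2 := PySem.List.sorted rocks (fun x => x) false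
  let pts := PySem.List.sorted (rocks2 ++ [0, distance]) (fun x => x) false
  (rocks2.foldl (bStep pts pts.length) (0, 0)).1

-- ===== PRECONDITION & SPEC =====
-- Pre_ excludes only rocks = [], on which A raises ValueError (max of an empty sequence).
def Pre_solution (distance : Int) (rocks : List Int) (n : Int) : Prop := rocks ≠ []
instance (distance : Int) (rocks : List Int) (n : Int) : Decidable (Pre_solution distance rocks n) := by unfold Pre_solution; infer_instance
def pvWitness_solution : Int × List Int × Int := (10, [3, 7], 2)

def Spec_solution (distance : Int) (rocks : List Int) (n : Int) (out : Int) : Prop := out = solution_alt distance rocks n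
instance (distance : Int) (rocks : List Int) (n : Int) (out : Int) : Decidable (Spec_solution distance rocks n out) := by unfold Spec_solution; infer_instance

-- ===== CLAIM (what is proved, stated in full; the proofs are below) =====
def Claim_equal_solution : Prop := ∀ (distance : Int) (rocks : List Int) (n : Int), Dom_solution distance rocks n → Pre_solution distance rocks n → Spec_solution distance rocks n (solution distance rocks n)

-- ===== LEMMAS AND PROOFS =====

-- the common per-rock value: min distance from t to the other points (first copy of t removed)
def nVal (pts : List Int) (t : Int) : Int :=
  (PySem.List.min? ((pts.erase t).map (fun x => |x - t|)) (fun y => y)).getD 0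

theorem remove_zero_map (t : Int) (l : List Int) (ht : t ∈ l) :
    PySem.List.remove? (l.map (fun x => |x - t|)) 0
      = some ((l.erase t).map (fun x => |x - t|)) := by
  induction l with
  | nil => cases ht
  | cons a l ih =>
    by_cases ha : a = t
    · subst ha
      rw [List.map_cons]
      have h0 : |a - a| = (0 : Int) := by simp
      rw [h0, PySem.List.remove?_cons_self, List.erase_cons_head]
    · have hne : |a - t| ≠ 0 := fun h => ha (by have := abs_eq_zero.mp h; omega)
      have ht' : t ∈ l := by
        rcases List.mem_cons.mp ht with h | h
        · exact absurd h.symm ha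
        · exact h
      rw [List.map_cons, PySem.List.remove?_cons_of_ne _ hne, ih ht',
        List.erase_cons_tail (by simp [ha])]
      rfl

theorem min?_id_eq (l : List Int) (m : Int) (hm : m ∈ l) (hlb : ∀ x ∈ l, m ≤ x) :
    PySem.List.min? l (fun y => y) = some m := by
  cases hmin : PySem.List.min? l (fun y => y) with
  | none =>
    rw [PySem.List.min?_eq_none_iff] at hmin
    subst hmin; cases hm
  | some m' =>
    have h1 : m' ∈ l := PySem.List.min?_mem hmin
    have h2 : m' ≤ m := by simpa using PySem.List.min?_isMin hmin m hm
    have h3 : m ≤ m' := hlb m' h1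
    rw [le_antisymm h2 h3]

theorem min?_id_perm (l1 l2 : List Int) (hp : l1.Perm l2) :
    PySem.List.min? l1 (fun y => y) = PySem.List.min? l2 (fun y => y) := by
  cases hmin : PySem.List.min? l1 (fun y => y) with
  | none =>
    rw [PySem.List.min?_eq_none_iff] at hmin
    subst hmin
    symm
    rw [PySem.List.min?_eq_none_iff]
    exact hp.symm.eq_nil
  | some m =>
    have h1 : m ∈ l2 := hp.mem_iff.mp (PySem.List.min?_mem hmin)
    have h2 : ∀ x ∈ l2, m ≤ x := fun x hx =>
      PySem.List.min?_isMin hmin x (hp.mem_iff.mpr hx)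
    exact (min?_id_eq l2 m h1 h2).symm

theorem le_getLast_of_pairwise (L : List Int) (hp : L.Pairwise (· ≤ ·)) (h : L ≠ []) :
    ∀ x ∈ L, x ≤ L.getLast h := by
  induction L with
  | nil => cases h rfl
  | cons a l ih =>
    intro x hx
    cases l with
    | nil => simp at hx; simp [hx]
    | cons b l' =>
      rw [List.getLast_cons (by simp)]
      rcases List.mem_cons.mp hx with h1 | h1
      · subst h1
        have := (List.pairwise_cons.mp hp).1 _ (List.getLast_mem (l := b :: l') (by simp))
        exact this
      · exact ih (List.pairwise_cons.mp hp).2 (by simp) x h1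

theorem sorted_split (pts : List Int) (hp : pts.Pairwise (· ≤ ·)) (t : Int) (ht : t ∈ pts) :
    ∃ L R, pts = L ++ t :: R ∧ ∀ x ∈ L, x < t := by
  induction pts with
  | nil => cases ht
  | cons a l ih =>
    by_cases ha : a = t
    · exact ⟨[], l, by simp [ha], by simp⟩
    · have ht' : t ∈ l := by
        rcases List.mem_cons.mp ht with h | h
        · exact absurd h.symm ha
        · exact h
      obtain ⟨L, R, hLR, hL⟩ := ih (List.pairwise_cons.mp hp).2 ht'
      have hat : a ≤ t := (List.pairwise_cons.mp hp).1 t ht'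
      exact ⟨a :: L, R, by simp [hLR], by
        intro x hx
        rcases List.mem_cons.mp hx with h | h
        · subst h; exact lt_of_le_of_ne hat ha
        · exact hL x h⟩

theorem bAdvance_spec (t : Int) (L R : List Int) (hL : ∀ x ∈ L, x < t) :
    ∀ j0, j0 ≤ L.length → bAdvance (L ++ t :: R) t j0 = L.length := by
  have hlen : (L ++ t :: R).length = L.length + R.length + 1 := by simp; omega
  intro j0 hj
  induction hn : L.length - j0 generalizing j0 with
  | zero =>
    have hj0 : j0 = L.length := by omega
    subst hj0
    rw [bAdvance]
    have h1 : L.length < (L ++ t :: R).length := by omega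
    rw [dif_pos h1]
    have h2 : (L ++ t :: R)[L.length]'h1 = t := by
      rw [List.getElem_append_right (by omega)]
      simp
    rw [h2, if_neg (lt_irrefl t)]
  | succ k ih =>
    have hj0 : j0 < L.length := by omega
    rw [bAdvance]
    have h1 : j0 < (L ++ t :: R).length := by omega
    rw [dif_pos h1]
    have h2 : (L ++ t :: R)[j0]'h1 = L[j0]'hj0 := List.getElem_append_left hj0
    rw [h2, if_pos (hL _ (List.getElem_mem hj0))]
    exact ih (j0 + 1) (by omega) (by omega)

theorem bNear_spec (t : Int) (L R : List Int)
    (hp : (L ++ t :: R).Pairwise (· ≤ ·)) (hL : ∀ x ∈ L, x < t)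
    (hne : L ≠ [] ∨ R ≠ []) :
    bNear (L ++ t :: R) (L ++ t :: R).length t L.length
      = (PySem.List.min? ((L ++ R).map (fun x => |x - t|)) (fun y => y)).getD 0 := by
  have hpL : L.Pairwise (· ≤ ·) := hp.sublist (List.sublist_append_left _ _)
  have hpR : (t :: R).Pairwise (· ≤ ·) := hp.sublist (List.sublist_append_right _ _)
  have htR : ∀ x ∈ R, t ≤ x := (List.pairwise_cons.mp hpR).1
  cases L with
  | nil =>
    cases R with
    | nil => simp at hne
    | cons r0 R' =>
      have hr0 : ∀ x ∈ r0 :: R', r0 ≤ x := by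
        have := List.pairwise_cons.mp (List.pairwise_cons.mp hpR).2
        intro x hx
        rcases List.mem_cons.mp hx with h | h
        · simp [h]
        · exact this.1 x h
      have hmin : PySem.List.min? ((([] : List Int) ++ r0 :: R').map (fun x => |x - t|)) (fun y => y)
          = some (|r0 - t|) := by
        apply min?_id_eq
        · simp
        · intro x hx
          simp only [List.nil_append, List.mem_map] at hx
          obtain ⟨y, hy, rfl⟩ := hx
          have h1 : t ≤ y := htR y (by simpa using hy)
          have h2 : r0 ≤ y := hr0 y (by simpa using hy)
          have h3 : t ≤ r0 := htR r0 (by simp)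
          rw [abs_of_nonneg (by omega), abs_of_nonneg (by omega)]
          omega
      rw [hmin]
      have h1 : t ≤ r0 := htR r0 (by simp)
      simp [bNear, abs_of_nonneg (show (0:Int) ≤ r0 - t by omega)]
  | cons a L' =>
    have hLne : (a :: L') ≠ [] := by simp
    have hlast := le_getLast_of_pairwise (a :: L') hpL hLne
    have hlastmem : (a :: L').getLast hLne ∈ a :: L' := List.getLast_mem hLne
    have hlastlt : (a :: L').getLast hLne < t := hL _ hlastmem
    have hgetlast : ((a :: L') ++ t :: R).getD ((a :: L').length - 1) 0
        = (a :: L').getLast hLne := by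
      rw [List.getD_eq_getElem?_getD, List.getElem?_append_left (by simp), List.getLast_eq_getElem]
      simp
      rfl
    cases R with
    | nil =>
      have hmin : PySem.List.min? (((a :: L') ++ ([] : List Int)).map (fun x => |x - t|)) (fun y => y)
          = some (|(a :: L').getLast hLne - t|) := by
        apply min?_id_eq
        · simp only [List.append_nil, List.mem_map]
          exact ⟨_, hlastmem, rfl⟩
        · intro x hx
          simp only [List.append_nil, List.mem_map] at hx
          obtain ⟨y, hy, rfl⟩ := hx
          have h1 : y < t := hL y hy
          have h2 : y ≤ (a :: L').getLast hLne := hlast y hy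
          rw [abs_of_nonpos (by omega), abs_of_nonpos (by omega)]
          omega
      rw [hmin]
      have hm : ((a :: L') ++ t :: ([] : List Int)).length = (a :: L').length + 1 := by simp
      simp only [bNear, hm, Option.getD_some]
      rw [if_neg (by omega), if_pos (by simp)]
      rw [abs_of_nonpos (by omega)]
      simp only [List.cons_append] at hgetlast ⊢
      rw [hgetlast]
      omega
    | cons r0 R' =>
      have hr0 : ∀ x ∈ r0 :: R', r0 ≤ x := by
        have := List.pairwise_cons.mp (List.pairwise_cons.mp hpR).2
        intro x hx
        rcases List.mem_cons.mp hx with h | h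
        · simp [h]
        · exact this.1 x h
      have htr0 : t ≤ r0 := htR r0 (by simp)
      have hgetr0 : ((a :: L') ++ t :: r0 :: R').getD ((a :: L').length + 1) 0 = r0 := by
        rw [List.getD_eq_getElem?_getD, List.getElem?_append_right (by simp)]
        simp
      have hmin : PySem.List.min? (((a :: L') ++ r0 :: R').map (fun x => |x - t|)) (fun y => y)
          = some (min (t - (a :: L').getLast hLne) (r0 - t)) := by
        apply min?_id_eq
        · rcases le_total (t - (a :: L').getLast hLne) (r0 - t) with h | h
          · rw [min_eq_left h]
            simp only [List.mem_map]
            exact ⟨_, List.mem_append_left _ hlastmem,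
              by rw [abs_of_nonpos (by omega)]; ring⟩
          · rw [min_eq_right h]
            simp only [List.mem_map]
            exact ⟨r0, List.mem_append_right _ (by simp),
              by rw [abs_of_nonneg (by omega)]⟩
        · intro x hx
          simp only [List.mem_map] at hx
          obtain ⟨y, hy, rfl⟩ := hx
          rcases List.mem_append.mp hy with h | h
          · have h1 : y < t := hL y h
            have h2 : y ≤ (a :: L').getLast hLne := hlast y h
            rw [abs_of_nonpos (by omega)]
            have := min_le_left (t - (a :: L').getLast hLne) (r0 - t)
            omega
          · have h1 : t ≤ y := htR y h
            have h2 : r0 ≤ y := hr0 y h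
            rw [abs_of_nonneg (by omega)]
            have := min_le_right (t - (a :: L').getLast hLne) (r0 - t)
            omega
      rw [hmin]
      have hm : ((a :: L') ++ t :: r0 :: R').length = (a :: L').length + R'.length + 2 := by
        simp; omega
      simp only [bNear, hm]
      rw [if_pos (by constructor <;> [simp; omega])]
      rw [hgetlast, hgetr0]
      simp

theorem takeWhile_eq_left (t : Int) (L R : List Int) (hL : ∀ x ∈ L, x < t) :
    (L ++ t :: R).takeWhile (fun x => decide (x < t)) = L := by
  induction L with
  | nil => simp [List.takeWhile]
  | cons a L' ih =>
    have ha : a < t := hL a (by simp)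
    rw [List.cons_append, List.takeWhile_cons, if_pos (by simpa using ha)]
    rw [ih (fun x hx => hL x (by simp [hx]))]

theorem length_takeWhile_mono (pts : List Int) (t t' : Int) (h : t ≤ t') :
    (pts.takeWhile (fun x => decide (x < t))).length
      ≤ (pts.takeWhile (fun x => decide (x < t'))).length := by
  induction pts with
  | nil => simp
  | cons a l ih =>
    by_cases ha : a < t
    · have ha' : a < t' := by omega
      simp [List.takeWhile_cons, ha, ha', ih]
    · simp [List.takeWhile_cons, ha]

theorem nVal_nonneg (pts : List Int) (t : Int) : 0 ≤ nVal pts t := by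
  unfold nVal
  cases hmin : PySem.List.min? ((pts.erase t).map (fun x => |x - t|)) (fun y => y) with
  | none => simp
  | some m =>
    have := PySem.List.min?_mem hmin
    simp only [List.mem_map] at this
    obtain ⟨y, _, rfl⟩ := this
    simp [abs_nonneg]

theorem fold_spec (pts : List Int) (hp : pts.Pairwise (· ≤ ·)) (hlen : 2 ≤ pts.length) :
    ∀ (rs : List Int) (ans : Int) (j0 : Nat), rs.Pairwise (· ≤ ·) →
      (∀ t ∈ rs, t ∈ pts) →
      (∀ t ∈ rs, j0 ≤ (pts.takeWhile (fun x => decide (x < t))).length) →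
      (rs.foldl (bStep pts pts.length) (ans, j0)).1
        = rs.foldl (fun a t => max a (nVal pts t)) ans := by
  intro rs
  induction rs with
  | nil => intro ans j0 _ _ _; rfl
  | cons t rs' ih =>
    intro ans j0 hrp hmem hj0
    obtain ⟨L, R, hLR, hL⟩ := sorted_split pts hp t (hmem t (by simp))
    have htW : pts.takeWhile (fun x => decide (x < t)) = L := by
      rw [hLR]; exact takeWhile_eq_left t L R hL
    have hadv : bAdvance pts t j0 = L.length := by
      rw [hLR]
      apply bAdvance_spec t L R hL
      have := hj0 t (by simp)
      rw [htW] at this; exact this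
    have htnL : t ∉ L := fun h => absurd (hL t h) (lt_irrefl t)
    have herase : (L ++ t :: R).erase t = L ++ R := by
      rw [List.erase_append_right _ htnL, List.erase_cons_head]
    have hne : L ≠ [] ∨ R ≠ [] := by
      by_cases hLe : L = []
      · right
        intro hRe
        rw [hLR, hLe, hRe] at hlen
        simp at hlen
      · left; exact hLe
    have hnear : bNear pts pts.length t L.length = nVal pts t := by
      unfold nVal
      rw [hLR, herase, bNear_spec t L R (hLR ▸ hp) hL hne]
    have hstep : bStep pts pts.length (ans, j0) t = (max ans (nVal pts t), L.length) := by
      simp only [bStep, hadv, hnear]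
      congr 1
      rcases lt_or_ge ans (nVal pts t) with h | h
      · rw [if_pos h, max_eq_right (le_of_lt h)]
      · rw [if_neg (not_lt.mpr h), max_eq_left h]
    rw [List.foldl_cons, hstep, List.foldl_cons]
    apply ih _ _ (List.pairwise_cons.mp hrp).2 (fun x hx => hmem x (by simp [hx]))
    intro t' ht'
    have htt' : t ≤ t' := (List.pairwise_cons.mp hrp).1 t' ht'
    calc L.length = (pts.takeWhile (fun x => decide (x < t))).length := by rw [htW]
      _ ≤ _ := length_takeWhile_mono pts t t' htt'

-- ===== VERDICT (by name: the statement is the Claim_ definition above) =====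
theorem solution_spec : Claim_equal_solution := by
  intro distance rocks n _ hpre
  unfold Spec_solution solution solution_alt
  simp only []
  set rs := PySem.List.sorted rocks (fun x => x) false with hrs
  set pts := PySem.List.sorted (rs ++ [0, distance]) (fun x => x) false with hpts
  have hrsne : rs ≠ [] := by
    rw [hrs, Ne, PySem.List.sorted_eq_nil_iff]
    exact hpre
  have hp : pts.Pairwise (· ≤ ·) := by
    have := PySem.List.sorted_pairwise (xs := rs ++ [0, distance]) (key := fun x => x)
    simpa using this
  have hrp : rs.Pairwise (· ≤ ·) := by
    have := PySem.List.sorted_pairwise (xs := rocks) (key := fun x => x)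
    simpa using this
  have hlenpts : pts.length = rs.length + 2 := by
    rw [hpts, PySem.List.length_sorted]
    simp
  have hperm : pts.Perm (rs ++ [0, distance]) := PySem.List.sorted_perm _ _ _
  -- A's per-rock values equal nVal pts
  have hmapeq : rs.map (fun t =>
      match PySem.List.remove? ((rs ++ [0, distance]).map (fun x => |x - t|)) 0 with
      | some tmp2 => (PySem.List.min? tmp2 (fun y => y)).getD 0
      | none => 0) = rs.map (fun t => nVal pts t) := by
    apply List.map_congr_left
    intro t ht
    have htall : t ∈ rs ++ [0, distance] := List.mem_append_left _ ht
    rw [remove_zero_map t _ htall]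
    simp only []
    unfold nVal
    congr 1
    apply min?_id_perm
    exact ((hperm.erase t).map _).symm
  rw [hmapeq]
  -- B's fold equals the running max of nVal
  have hfold : (rs.foldl (bStep pts pts.length) (0, 0)).1
      = rs.foldl (fun a t => max a (nVal pts t)) 0 :=
    fold_spec pts hp (by omega) rs 0 0 hrp
      (fun t ht => (PySem.List.mem_sorted _ _ _ _).mpr (List.mem_append_left _ ht))
      (fun t _ => Nat.zero_le _)
  rw [hfold]
  -- both sides are the running max over the same list
  cases hrscons : rs with
  | nil => exact absurd hrscons hrsne
  | cons r0 rest =>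
    rw [List.map_cons, PySem.List.max?_id_cons]
    simp only [Option.getD_some]
    rw [List.foldl_cons]
    have h0 : max 0 (nVal pts r0) = nVal pts r0 :=
      max_eq_right (nVal_nonneg pts r0)
    rw [h0, List.foldl_map]
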